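-- pv_equiv track=rewrite | github.com/b-zhu524/usaco_practice | feb_20_bronze/triangles/triangles.py | solve
-- ===== SOURCE A (Python) =====
-- from itertools import combinations
--
-- def x_parallel(p1, p2):
--     return p1[1] == p2[1]
--
-- def y_parallel(p1, p2):
--     return p1[0] == p2[0]
--
-- def solve(n, points):
--     largest_area = 0
--     for p1, p2, p3 in combinations(points, 3):
--         if x_parallel(p1, p2):
--             x_len = abs(p1[0]-p2[0])
--             if y_parallel(p1, p3):
--                 y_len = abs(p1[1]-p3[1])
--                 largest_area = max(largest_area, x_len*y_len)
--             if y_parallel(p2, p3):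
--                 y_len = abs(p2[1]-p3[1])
--                 largest_area = max(largest_area, x_len * y_len)
--
--         if x_parallel(p1, p3):
--             x_len = abs(p1[0]-p3[0])
--             if y_parallel(p1, p2):
--                 y_len = abs(p1[1]-p2[1])
--                 largest_area = max(largest_area, x_len * y_len)
--
--             if y_parallel(p2, p3):
--                 y_len = abs(p2[1]-p3[1])
--                 largest_area = max(largest_area, x_len * y_len)
--
--         if x_parallel(p2, p3):
--             x_len = abs(p2[0]-p3[0])
--             if y_parallel(p1, p2):
--                 y_len = abs(p1[1]-p2[1])
--                 largest_area = max(largest_area, x_len * y_len)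
--
--             if y_parallel(p1, p3):
--                 y_len = abs(p1[1]-p3[1])
--                 largest_area = max(largest_area, x_len * y_len)
--
--     return largest_area
-- ===== SOURCE B (Python) =====
-- def solve(n, points):
--     # per-vertex: for each point, longest horizontal leg x longest vertical leg
--     best = 0
--     for p in points:
--         h = 0
--         v = 0
--         for q in points:
--             if q[1] == p[1]:
--                 h = max(h, abs(p[0] - q[0]))
--             if q[0] == p[0]:
--                 v = max(v, abs(p[1] - q[1]))
--         best = max(best, h * v)
--     return best
-- ===== Notes on version B (the rewrite author's own statement) =====
-- stated objective: faster
-- what changed: Replaces the O(n^3) enumeration of all point triples by a per-vertex scan: for each point take the longest horizontal leg (same y) and longest vertical leg (same x) and maximise their product.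
import Mathlib
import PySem

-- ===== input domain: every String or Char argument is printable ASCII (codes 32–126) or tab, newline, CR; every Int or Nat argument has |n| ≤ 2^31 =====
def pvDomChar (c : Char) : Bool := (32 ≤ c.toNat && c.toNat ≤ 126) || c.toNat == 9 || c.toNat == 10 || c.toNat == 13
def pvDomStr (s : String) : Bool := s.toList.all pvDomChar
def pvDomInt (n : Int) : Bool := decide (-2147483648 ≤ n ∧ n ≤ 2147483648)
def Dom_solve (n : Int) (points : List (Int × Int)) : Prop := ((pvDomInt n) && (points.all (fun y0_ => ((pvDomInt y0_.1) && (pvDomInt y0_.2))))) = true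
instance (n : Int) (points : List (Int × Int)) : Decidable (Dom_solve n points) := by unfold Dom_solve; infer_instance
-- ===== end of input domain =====

-- B replaces A's enumeration of all point triples by a per-vertex scan for the two longest legs (measured faster).

-- ===== PORT A =====
-- itertools-style: all (i<j) index pairs, as values
def pairs2 {α : Type} : List α → List (α × α)
  | [] => []
  | x :: xs => xs.map (fun y => (x, y)) ++ pairs2 xs

-- itertools.combinations(l, 3)
def combos3 {α : Type} : List α → List (α × α × α)
  | [] => []
  | x :: xs => (pairs2 xs).map (fun qr => (x, qr.1, qr.2)) ++ combos3 xs

-- the three `if x_parallel(..)` blocks of A's loop body, in source order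
def block1 (acc : Int) (p1 p2 p3 : Int × Int) : Int :=
  if p1.2 = p2.2 then
    let xl := |p1.1 - p2.1|
    let b := if p1.1 = p3.1 then max acc (xl * |p1.2 - p3.2|) else acc
    if p2.1 = p3.1 then max b (xl * |p2.2 - p3.2|) else b
  else acc

def block2 (acc : Int) (p1 p2 p3 : Int × Int) : Int :=
  if p1.2 = p3.2 then
    let xl := |p1.1 - p3.1|
    let b := if p1.1 = p2.1 then max acc (xl * |p1.2 - p2.2|) else acc
    if p2.1 = p3.1 then max b (xl * |p2.2 - p3.2|) else b
  else acc

def block3 (acc : Int) (p1 p2 p3 : Int × Int) : Int :=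
  if p2.2 = p3.2 then
    let xl := |p2.1 - p3.1|
    let b := if p1.1 = p2.1 then max acc (xl * |p1.2 - p2.2|) else acc
    if p1.1 = p3.1 then max b (xl * |p1.2 - p3.2|) else b
  else acc

-- one loop-body iteration of A: the three blocks in order
def stepA (acc : Int) (t : (Int × Int) × (Int × Int) × (Int × Int)) : Int :=
  block3 (block2 (block1 acc t.1 t.2.1 t.2.2) t.1 t.2.1 t.2.2) t.1 t.2.1 t.2.2

def solve (n : Int) (points : List (Int × Int)) : Int :=
  (combos3 points).foldl stepA 0

-- ===== PORT B =====
-- inner loop of B: longest horizontal and vertical legs at p, one pass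
def legs (p : Int × Int) (points : List (Int × Int)) : Int × Int :=
  points.foldl (fun hv q =>
    let h := if q.2 = p.2 then max hv.1 |p.1 - q.1| else hv.1
    let v := if q.1 = p.1 then max hv.2 |p.2 - q.2| else hv.2
    (h, v)) (0, 0)

def solve_alt (n : Int) (points : List (Int × Int)) : Int :=
  points.foldl (fun best p => max best ((legs p points).1 * (legs p points).2)) 0

-- ===== PRECONDITION & SPEC =====
def Spec_solve (n : Int) (points : List (Int × Int)) (out : Int) : Prop := out = solve_alt n points
instance (n : Int) (points : List (Int × Int)) (out : Int) : Decidable (Spec_solve n points out) := by unfold Spec_solve; infer_instance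

-- ===== CLAIM (what is proved, stated in full; the proofs are below) =====
def Claim_equal_solve : Prop := ∀ (n : Int) (points : List (Int × Int)), Dom_solve n points → Spec_solve n points (solve n points)

-- ===== LEMMAS AND PROOFS =====

-- generic foldl bounds
theorem le_foldl_self {α : Type} (step : Int → α → Int) (hs : ∀ b t, b ≤ step b t) :
    ∀ (l : List α) (a : Int), a ≤ l.foldl step a := by
  intro l
  induction l with
  | nil => intro a; exact le_refl a
  | cons x xs ih => intro a; exact le_trans (hs a x) (ih (step a x))

theorem le_foldl_of_mem {α : Type} (step : Int → α → Int) (hs : ∀ b t, b ≤ step b t)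
    {t : α} {x : Int} (hx : ∀ b, x ≤ step b t) :
    ∀ (l : List α) (a : Int), t ∈ l → x ≤ l.foldl step a := by
  intro l
  induction l with
  | nil => intro a h; cases h
  | cons y ys ih =>
    intro a h
    rcases List.mem_cons.mp h with h | h
    · subst h; exact le_trans (hx a) (le_foldl_self step hs ys (step a t))
    · exact ih (step a y) h

theorem foldl_le {α : Type} (step : Int → α → Int) {S : Int} :
    ∀ (l : List α), (∀ b t, b ≤ S → t ∈ l → step b t ≤ S) →
      ∀ (a : Int), a ≤ S → l.foldl step a ≤ S := by
  intro l
  induction l with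
  | nil => intro _ a h; exact h
  | cons x xs ih =>
    intro hstep a h
    exact ih (fun b t hb ht => hstep b t hb (List.mem_cons_of_mem _ ht)) (step a x)
      (hstep a x h List.mem_cons_self)

-- max-if folds (the shape of B's leg scans)
theorem maxfold_init_le {α : Type} (c : α → Prop) [DecidablePred c] (f : α → Int)
    (l : List α) (a : Int) : a ≤ l.foldl (fun m q => if c q then max m (f q) else m) a := by
  apply le_foldl_self
  intro b t
  by_cases h : c t <;> simp [h]

theorem maxfold_le_of_mem {α : Type} (c : α → Prop) [DecidablePred c] (f : α → Int)
    {q : α} (l : List α) (a : Int) (hq : q ∈ l) (hc : c q) :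
    f q ≤ l.foldl (fun m q => if c q then max m (f q) else m) a := by
  apply le_foldl_of_mem _ _ _ l a hq
  · intro b t; by_cases h : c t <;> simp [h]
  · intro b; simp [hc]

theorem maxfold_cases {α : Type} (c : α → Prop) [DecidablePred c] (f : α → Int) :
    ∀ (l : List α) (a : Int),
      l.foldl (fun m q => if c q then max m (f q) else m) a = a ∨
      ∃ q ∈ l, c q ∧ l.foldl (fun m q => if c q then max m (f q) else m) a = f q := by
  intro l
  induction l with
  | nil => intro a; left; rfl
  | cons x xs ih =>
    intro a
    simp only [List.foldl_cons]
    by_cases hx : c x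
    · rw [if_pos hx]
      rcases ih (max a (f x)) with h | ⟨q, hq, hcq, h⟩
      · rcases max_choice a (f x) with hm | hm
        · left; rw [h, hm]
        · right; exact ⟨x, List.mem_cons_self, hx, by rw [h, hm]⟩
      · right; exact ⟨q, List.mem_cons_of_mem _ hq, hcq, h⟩
    · rw [if_neg hx]
      rcases ih a with h | ⟨q, hq, hcq, h⟩
      · left; exact h
      · right; exact ⟨q, List.mem_cons_of_mem _ hq, hcq, h⟩

-- B's scans, split into the two leg maxima
def Hm (p : Int × Int) (l : List (Int × Int)) : Int :=
  l.foldl (fun m q => if q.2 = p.2 then max m |p.1 - q.1| else m) 0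

def Vm (p : Int × Int) (l : List (Int × Int)) : Int :=
  l.foldl (fun m q => if q.1 = p.1 then max m |p.2 - q.2| else m) 0

theorem legs_eq_aux (p : Int × Int) :
    ∀ (l : List (Int × Int)) (a b : Int),
      l.foldl (fun hv q =>
        let h := if q.2 = p.2 then max hv.1 |p.1 - q.1| else hv.1
        let v := if q.1 = p.1 then max hv.2 |p.2 - q.2| else hv.2
        (h, v)) (a, b)
      = (l.foldl (fun m q => if q.2 = p.2 then max m |p.1 - q.1| else m) a,
         l.foldl (fun m q => if q.1 = p.1 then max m |p.2 - q.2| else m) b) := by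
  intro l
  induction l with
  | nil => intro a b; rfl
  | cons x xs ih => intro a b; simp only [List.foldl_cons]; exact ih _ _

theorem legs_eq (p : Int × Int) (l : List (Int × Int)) : legs p l = (Hm p l, Vm p l) := by
  unfold legs Hm Vm; exact legs_eq_aux p l 0 0

theorem Hm_nonneg (p : Int × Int) (l : List (Int × Int)) : 0 ≤ Hm p l :=
  maxfold_init_le _ _ l 0

theorem Hm_cases (p : Int × Int) (l : List (Int × Int)) :
    Hm p l = 0 ∨ ∃ q ∈ l, q.2 = p.2 ∧ Hm p l = |p.1 - q.1| := by
  unfold Hm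
  exact maxfold_cases (fun q : Int × Int => q.2 = p.2) (fun q : Int × Int => |p.1 - q.1|) l 0

theorem Vm_cases (p : Int × Int) (l : List (Int × Int)) :
    Vm p l = 0 ∨ ∃ q ∈ l, q.1 = p.1 ∧ Vm p l = |p.2 - q.2| := by
  unfold Vm
  exact maxfold_cases (fun q : Int × Int => q.1 = p.1) (fun q : Int × Int => |p.2 - q.2|) l 0

theorem solve_alt_nonneg (n : Int) (pts : List (Int × Int)) : 0 ≤ solve_alt n pts := by
  unfold solve_alt
  apply le_foldl_self
  intro b t; exact le_max_left _ _

-- key bound for direction A ≤ B: any axis-aligned leg product at a vertex of the list is ≤ B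
theorem vertexB_le (n : Int) (pts : List (Int × Int)) {a b c : Int × Int}
    (ha : a ∈ pts) (hb : b ∈ pts) (hc : c ∈ pts)
    (hby : b.2 = a.2) (hcx : c.1 = a.1) :
    |a.1 - b.1| * |a.2 - c.2| ≤ solve_alt n pts := by
  have hH : |a.1 - b.1| ≤ Hm a pts :=
    maxfold_le_of_mem (fun q => q.2 = a.2) (fun q => |a.1 - q.1|) pts 0 hb hby
  have hV : |a.2 - c.2| ≤ Vm a pts :=
    maxfold_le_of_mem (fun q => q.1 = a.1) (fun q => |a.2 - q.2|) pts 0 hc hcx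
  have hprod : |a.1 - b.1| * |a.2 - c.2| ≤ Hm a pts * Vm a pts :=
    mul_le_mul hH hV (abs_nonneg _) (Hm_nonneg a pts)
  refine le_trans hprod ?_
  unfold solve_alt
  apply le_foldl_of_mem _ _ _ pts 0 ha
  · intro b' t; exact le_max_left _ _
  · intro b'; rw [legs_eq]; exact le_max_right _ _

-- each candidate branch of A at (a,b,c) is ≤ B, given memberships
theorem cand1 (n : Int) (pts : List (Int × Int)) {a b c : Int × Int}
    (ha : a ∈ pts) (hb : b ∈ pts) (hc : c ∈ pts) (h1 : a.2 = b.2) (h2 : a.1 = c.1) :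
    |a.1 - b.1| * |a.2 - c.2| ≤ solve_alt n pts :=
  vertexB_le n pts ha hb hc h1.symm h2.symm

theorem cand2 (n : Int) (pts : List (Int × Int)) {a b c : Int × Int}
    (ha : a ∈ pts) (hb : b ∈ pts) (hc : c ∈ pts) (h1 : a.2 = b.2) (h3 : b.1 = c.1) :
    |a.1 - b.1| * |b.2 - c.2| ≤ solve_alt n pts := by
  rw [abs_sub_comm a.1 b.1]; exact vertexB_le n pts hb ha hc h1 h3.symm

theorem cand3 (n : Int) (pts : List (Int × Int)) {a b c : Int × Int}
    (ha : a ∈ pts) (hb : b ∈ pts) (hc : c ∈ pts) (h4 : a.2 = c.2) (h5 : a.1 = b.1) :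
    |a.1 - c.1| * |a.2 - b.2| ≤ solve_alt n pts :=
  vertexB_le n pts ha hc hb h4.symm h5.symm

theorem cand4 (n : Int) (pts : List (Int × Int)) {a b c : Int × Int}
    (ha : a ∈ pts) (hb : b ∈ pts) (hc : c ∈ pts) (h4 : a.2 = c.2) (h3 : b.1 = c.1) :
    |a.1 - c.1| * |b.2 - c.2| ≤ solve_alt n pts := by
  rw [abs_sub_comm a.1 c.1, abs_sub_comm b.2 c.2]; exact vertexB_le n pts hc ha hb h4 h3

theorem cand5 (n : Int) (pts : List (Int × Int)) {a b c : Int × Int}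
    (ha : a ∈ pts) (hb : b ∈ pts) (hc : c ∈ pts) (h7 : b.2 = c.2) (h5 : a.1 = b.1) :
    |b.1 - c.1| * |a.2 - b.2| ≤ solve_alt n pts := by
  rw [abs_sub_comm a.2 b.2]; exact vertexB_le n pts hb hc ha h7.symm h5

theorem cand6 (n : Int) (pts : List (Int × Int)) {a b c : Int × Int}
    (ha : a ∈ pts) (hb : b ∈ pts) (hc : c ∈ pts) (h7 : b.2 = c.2) (h2 : a.1 = c.1) :
    |b.1 - c.1| * |a.2 - c.2| ≤ solve_alt n pts := by
  rw [abs_sub_comm b.1 c.1, abs_sub_comm a.2 c.2]; exact vertexB_le n pts hc hb ha h7 h2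

-- membership facts for the combination lists
theorem pairs2_mem {α : Type} {q r : α} : ∀ {l : List α}, (q, r) ∈ pairs2 l → q ∈ l ∧ r ∈ l := by
  intro l
  induction l with
  | nil => intro h; cases h
  | cons x xs ih =>
    intro h
    simp only [pairs2, List.mem_append, List.mem_map] at h
    rcases h with ⟨y, hy, he⟩ | h
    · cases he; exact ⟨List.mem_cons_self, List.mem_cons_of_mem _ hy⟩
    · exact ⟨List.mem_cons_of_mem _ (ih h).1, List.mem_cons_of_mem _ (ih h).2⟩

theorem combos3_mem {α : Type} {a b c : α} :
    ∀ {l : List α}, (a, b, c) ∈ combos3 l → a ∈ l ∧ b ∈ l ∧ c ∈ l := by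
  intro l
  induction l with
  | nil => intro h; cases h
  | cons x xs ih =>
    intro h
    simp only [combos3, List.mem_append, List.mem_map] at h
    rcases h with ⟨qr, hqr, he⟩ | h
    · cases he
      obtain ⟨h1, h2⟩ := pairs2_mem hqr
      exact ⟨List.mem_cons_self, List.mem_cons_of_mem _ h1, List.mem_cons_of_mem _ h2⟩
    · obtain ⟨h1, h2, h3⟩ := ih h
      exact ⟨List.mem_cons_of_mem _ h1, List.mem_cons_of_mem _ h2, List.mem_cons_of_mem _ h3⟩

theorem mem_pairs2 {α : Type} {a b : α} :
    ∀ {l : List α}, List.Sublist [a, b] l → (a, b) ∈ pairs2 l := by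
  intro l h
  induction l with
  | nil => cases h
  | cons x xs ih =>
    cases h with
    | cons _ h => simp only [pairs2, List.mem_append]; right; exact ih h
    | cons₂ _ h =>
      simp only [pairs2, List.mem_append, List.mem_map]
      left
      exact ⟨b, h.subset List.mem_cons_self, rfl⟩

theorem mem_combos3 {α : Type} {a b c : α} :
    ∀ {l : List α}, List.Sublist [a, b, c] l → (a, b, c) ∈ combos3 l := by
  intro l h
  induction l with
  | nil => cases h
  | cons x xs ih =>
    cases h with
    | cons _ h => simp only [combos3, List.mem_append]; right; exact ih h
    | cons₂ _ h =>
      simp only [combos3, List.mem_append, List.mem_map]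
      left
      exact ⟨(b, c), mem_pairs2 h, rfl⟩

-- block facts
theorem block1_self (acc : Int) (p1 p2 p3 : Int × Int) : acc ≤ block1 acc p1 p2 p3 := by
  unfold block1; split_ifs <;> simp [le_max_iff]

theorem block2_self (acc : Int) (p1 p2 p3 : Int × Int) : acc ≤ block2 acc p1 p2 p3 := by
  unfold block2; split_ifs <;> simp [le_max_iff]

theorem block3_self (acc : Int) (p1 p2 p3 : Int × Int) : acc ≤ block3 acc p1 p2 p3 := by
  unfold block3; split_ifs <;> simp [le_max_iff]

theorem stepA_self (acc : Int) (t : (Int × Int) × (Int × Int) × (Int × Int)) :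
    acc ≤ stepA acc t := by
  unfold stepA
  exact le_trans (block1_self acc t.1 t.2.1 t.2.2)
    (le_trans (block2_self _ t.1 t.2.1 t.2.2) (block3_self _ t.1 t.2.1 t.2.2))

theorem block1_le {S : Int} (acc : Int) (p1 p2 p3 : Int × Int) (hacc : acc ≤ S)
    (h1 : p1.2 = p2.2 → p1.1 = p3.1 → |p1.1 - p2.1| * |p1.2 - p3.2| ≤ S)
    (h2 : p1.2 = p2.2 → p2.1 = p3.1 → |p1.1 - p2.1| * |p2.2 - p3.2| ≤ S) :
    block1 acc p1 p2 p3 ≤ S := by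
  unfold block1
  split_ifs <;>
    repeat' first
      | apply max_le
      | exact hacc
      | exact h1 (by assumption) (by assumption)
      | exact h2 (by assumption) (by assumption)

theorem block2_le {S : Int} (acc : Int) (p1 p2 p3 : Int × Int) (hacc : acc ≤ S)
    (h1 : p1.2 = p3.2 → p1.1 = p2.1 → |p1.1 - p3.1| * |p1.2 - p2.2| ≤ S)
    (h2 : p1.2 = p3.2 → p2.1 = p3.1 → |p1.1 - p3.1| * |p2.2 - p3.2| ≤ S) :
    block2 acc p1 p2 p3 ≤ S := by
  unfold block2
  split_ifs <;>
    repeat' first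
      | apply max_le
      | exact hacc
      | exact h1 (by assumption) (by assumption)
      | exact h2 (by assumption) (by assumption)

theorem block3_le {S : Int} (acc : Int) (p1 p2 p3 : Int × Int) (hacc : acc ≤ S)
    (h1 : p2.2 = p3.2 → p1.1 = p2.1 → |p2.1 - p3.1| * |p1.2 - p2.2| ≤ S)
    (h2 : p2.2 = p3.2 → p1.1 = p3.1 → |p2.1 - p3.1| * |p1.2 - p3.2| ≤ S) :
    block3 acc p1 p2 p3 ≤ S := by
  unfold block3
  split_ifs <;>
    repeat' first
      | apply max_le
      | exact hacc
      | exact h1 (by assumption) (by assumption)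
      | exact h2 (by assumption) (by assumption)

-- the candidate of each fired branch is ≤ the block's value
theorem br1 (acc : Int) (p1 p2 p3 : Int × Int) (h1 : p1.2 = p2.2) (h2 : p1.1 = p3.1) :
    |p1.1 - p2.1| * |p1.2 - p3.2| ≤ stepA acc (p1, p2, p3) := by
  have h : |p1.1 - p2.1| * |p1.2 - p3.2| ≤ block1 acc p1 p2 p3 := by
    unfold block1; split_ifs <;> simp_all [le_max_iff]
  exact le_trans h (le_trans (block2_self _ p1 p2 p3) (block3_self _ p1 p2 p3))

theorem br2 (acc : Int) (p1 p2 p3 : Int × Int) (h1 : p1.2 = p2.2) (h3 : p2.1 = p3.1) :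
    |p1.1 - p2.1| * |p2.2 - p3.2| ≤ stepA acc (p1, p2, p3) := by
  have h : |p1.1 - p2.1| * |p2.2 - p3.2| ≤ block1 acc p1 p2 p3 := by
    unfold block1; split_ifs <;> simp_all [le_max_iff]
  exact le_trans h (le_trans (block2_self _ p1 p2 p3) (block3_self _ p1 p2 p3))

theorem br3 (acc : Int) (p1 p2 p3 : Int × Int) (h4 : p1.2 = p3.2) (h5 : p1.1 = p2.1) :
    |p1.1 - p3.1| * |p1.2 - p2.2| ≤ stepA acc (p1, p2, p3) := by
  have h : |p1.1 - p3.1| * |p1.2 - p2.2| ≤ block2 (block1 acc p1 p2 p3) p1 p2 p3 := by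
    unfold block2; split_ifs <;> simp_all [le_max_iff]
  exact le_trans h (block3_self _ p1 p2 p3)

theorem br4 (acc : Int) (p1 p2 p3 : Int × Int) (h4 : p1.2 = p3.2) (h3 : p2.1 = p3.1) :
    |p1.1 - p3.1| * |p2.2 - p3.2| ≤ stepA acc (p1, p2, p3) := by
  have h : |p1.1 - p3.1| * |p2.2 - p3.2| ≤ block2 (block1 acc p1 p2 p3) p1 p2 p3 := by
    unfold block2; split_ifs <;> simp_all [le_max_iff]
  exact le_trans h (block3_self _ p1 p2 p3)

theorem br5 (acc : Int) (p1 p2 p3 : Int × Int) (h7 : p2.2 = p3.2) (h5 : p1.1 = p2.1) :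
    |p2.1 - p3.1| * |p1.2 - p2.2| ≤ stepA acc (p1, p2, p3) := by
  unfold stepA block3; split_ifs <;> simp_all [le_max_iff]

theorem br6 (acc : Int) (p1 p2 p3 : Int × Int) (h7 : p2.2 = p3.2) (h2 : p1.1 = p3.1) :
    |p2.1 - p3.1| * |p1.2 - p3.2| ≤ stepA acc (p1, p2, p3) := by
  unfold stepA block3; split_ifs <;> simp_all [le_max_iff]

theorem solve_nonneg (n : Int) (pts : List (Int × Int)) : 0 ≤ solve n pts := by
  unfold solve
  exact le_foldl_self _ stepA_self _ 0

-- direction A ≤ B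
theorem solve_le_alt (n : Int) (pts : List (Int × Int)) : solve n pts ≤ solve_alt n pts := by
  unfold solve
  apply foldl_le _ _ _ 0 (solve_alt_nonneg n pts)
  intro acc t hacc ht
  obtain ⟨a, b, c⟩ := t
  obtain ⟨ha, hb, hc⟩ := combos3_mem ht
  show block3 (block2 (block1 acc a b c) a b c) a b c ≤ solve_alt n pts
  apply block3_le _ a b c
  · apply block2_le _ a b c
    · apply block1_le _ a b c hacc
      · exact fun u v => cand1 n pts ha hb hc u v
      · exact fun u v => cand2 n pts ha hb hc u v
    · exact fun u v => cand3 n pts ha hb hc u v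
    · exact fun u v => cand4 n pts ha hb hc u v
  · exact fun u v => cand5 n pts ha hb hc u v
  · exact fun u v => cand6 n pts ha hb hc u v

-- permutation shapes of 2- and 3-element lists
theorem perm2_cases {α : Type} {b c x y : α} (h : List.Perm [b, c] [x, y]) :
    (b = x ∧ c = y) ∨ (b = y ∧ c = x) := by
  have hb : b ∈ [x, y] := h.subset List.mem_cons_self
  rcases List.mem_pair.mp hb with hbx | hby
  · subst hbx
    have h2 := h.cons_inv
    left; exact ⟨rfl, by simpa using List.perm_singleton.mp h2⟩
  · subst hby
    have h' : List.Perm [b, c] [b, x] := h.trans (List.Perm.swap b x [])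
    have h2 := h'.cons_inv
    right; exact ⟨rfl, by simpa using List.perm_singleton.mp h2⟩

theorem perm3_cases {α : Type} {a b c p q r : α} (h : List.Perm [a, b, c] [p, q, r]) :
    (a = p ∧ b = q ∧ c = r) ∨ (a = p ∧ b = r ∧ c = q) ∨
    (a = q ∧ b = p ∧ c = r) ∨ (a = q ∧ b = r ∧ c = p) ∨
    (a = r ∧ b = p ∧ c = q) ∨ (a = r ∧ b = q ∧ c = p) := by
  have hmem : a ∈ [p, q, r] := h.subset List.mem_cons_self
  simp only [List.mem_cons, List.not_mem_nil, or_false] at hmem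
  rcases hmem with hap | haq | har
  · subst hap
    rcases perm2_cases h.cons_inv with ⟨h1, h2⟩ | ⟨h1, h2⟩
    · exact Or.inl ⟨rfl, h1, h2⟩
    · exact Or.inr (Or.inl ⟨rfl, h1, h2⟩)
  · subst haq
    have h' : List.Perm [a, b, c] [a, p, r] := h.trans (List.Perm.swap a p [r])
    rcases perm2_cases h'.cons_inv with ⟨h1, h2⟩ | ⟨h1, h2⟩
    · exact Or.inr (Or.inr (Or.inl ⟨rfl, h1, h2⟩))
    · exact Or.inr (Or.inr (Or.inr (Or.inl ⟨rfl, h1, h2⟩)))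
  · subst har
    have h' : List.Perm [a, b, c] [a, p, q] :=
      h.trans ((List.Perm.cons p (List.Perm.swap a q [])).trans (List.Perm.swap a p [q]))
    rcases perm2_cases h'.cons_inv with ⟨h1, h2⟩ | ⟨h1, h2⟩
    · exact Or.inr (Or.inr (Or.inr (Or.inr (Or.inl ⟨rfl, h1, h2⟩))))
    · exact Or.inr (Or.inr (Or.inr (Or.inr (Or.inr ⟨rfl, h1, h2⟩))))

-- direction B ≤ A: the per-vertex product at p ∈ pts is attained by some triple of A
theorem prod_le_solve (n : Int) (pts : List (Int × Int)) {p : Int × Int} (hp : p ∈ pts) :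
    Hm p pts * Vm p pts ≤ solve n pts := by
  rcases Hm_cases p pts with hH | ⟨q, hq, hqy, hH⟩
  · rw [hH, zero_mul]; exact solve_nonneg n pts
  · rcases Vm_cases p pts with hV | ⟨r, hr, hrx, hV⟩
    · rw [hV, mul_zero]; exact solve_nonneg n pts
    · rw [hH, hV]
      by_cases hpq : p.1 = q.1
      · rw [show |p.1 - q.1| = 0 by rw [hpq]; simp, zero_mul]; exact solve_nonneg n pts
      by_cases hpr : p.2 = r.2
      · rw [show |p.2 - r.2| = 0 by rw [hpr]; simp, mul_zero]; exact solve_nonneg n pts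
      -- p, q, r are pairwise distinct points of pts
      have hpq' : p ≠ q := fun h => hpq (by rw [h])
      have hpr' : p ≠ r := fun h => hpr (by rw [h])
      have hqr' : q ≠ r := fun h => hpq (by rw [h] at hqy ⊢; rw [hrx])
      have nd : List.Nodup [p, q, r] := by
        simp [List.nodup_cons, hpq', hpr', hqr']
      have hsub : [p, q, r] ⊆ pts := by
        intro x hx
        simp only [List.mem_cons, List.not_mem_nil, or_false] at hx
        rcases hx with h | h | h <;> subst h <;> assumption
      obtain ⟨l', hperm, hsl⟩ := nd.subperm hsub
      have hlen : l'.length = 3 := by simpa using hperm.length_eq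
      obtain ⟨a, b, c, rfl⟩ : ∃ a b c, l' = [a, b, c] := by
        match l', hlen with
        | [a, b, c], _ => exact ⟨a, b, c, rfl⟩
      have hmem : ((a, b, c) : (Int × Int) × (Int × Int) × (Int × Int)) ∈ combos3 pts :=
        mem_combos3 hsl
      have hcand : ∀ acc, |p.1 - q.1| * |p.2 - r.2| ≤ stepA acc (a, b, c) := by
        intro acc
        rcases perm3_cases hperm with
          ⟨e1, e2, e3⟩ | ⟨e1, e2, e3⟩ | ⟨e1, e2, e3⟩ | ⟨e1, e2, e3⟩ | ⟨e1, e2, e3⟩ | ⟨e1, e2, e3⟩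
        · rw [e1, e2, e3]; exact br1 acc p q r hqy.symm hrx.symm
        · rw [e1, e2, e3]; exact br3 acc p r q hqy.symm hrx.symm
        · rw [e1, e2, e3, abs_sub_comm p.1 q.1]; exact br2 acc q p r hqy hrx.symm
        · rw [e1, e2, e3, abs_sub_comm p.1 q.1, abs_sub_comm p.2 r.2]; exact br4 acc q r p hqy hrx
        · rw [e1, e2, e3, abs_sub_comm p.2 r.2]; exact br5 acc r p q hqy.symm hrx
        · rw [e1, e2, e3, abs_sub_comm p.1 q.1, abs_sub_comm p.2 r.2]; exact br6 acc r q p hqy hrx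
      unfold solve
      exact le_foldl_of_mem stepA stepA_self hcand (combos3 pts) 0 hmem

theorem alt_le_solve (n : Int) (pts : List (Int × Int)) : solve_alt n pts ≤ solve n pts := by
  unfold solve_alt
  apply foldl_le _ _ _ 0 (solve_nonneg n pts)
  intro b p hb hp
  apply max_le hb
  rw [legs_eq]
  exact prod_le_solve n pts hp

-- ===== VERDICT (by name: the statement is the Claim_ definition above) =====
theorem solve_spec : Claim_equal_solve := by
  intro n points _
  unfold Spec_solve
  exact le_antisymm (solve_le_alt n points) (alt_le_solve n points)
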